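-- pv_equiv track=rewrite | github.com/MusulmonLolayev/AIPython | ai/exercises/exercise.py | MaxMinByClass
-- ===== SOURCE A (Python) =====
-- def MaxMinByClass(R, classes):
--     Min_K1 = None
--     Max_K2 = None
--     for i in range(len(R)):
--         if classes[i] == 0:
--             if Min_K1 == None or Min_K1 > R[i]:
--                 Min_K1 = R[i]
--         else:
--             if Max_K2 == None or Max_K2 < R[i]:
--                 Max_K2 = R[i]
--     return Min_K1, Max_K2
-- ===== SOURCE B (Python) =====
-- def MaxMinByClass(R, classes):
--     zeros = [r for r, c in zip(R, classes) if c == 0]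
--     ones = [r for r, c in zip(R, classes) if c != 0]
--     return min(zeros, default=None), max(ones, default=None)
-- ===== Notes on version B (the rewrite author's own statement) =====
-- stated objective: simpler
-- what changed: Replaces the fused index loop with two state variables by a partition of zip(R, classes) into the class-0 and class-nonzero values followed by built-in min/max with default=None.
import Mathlib
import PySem

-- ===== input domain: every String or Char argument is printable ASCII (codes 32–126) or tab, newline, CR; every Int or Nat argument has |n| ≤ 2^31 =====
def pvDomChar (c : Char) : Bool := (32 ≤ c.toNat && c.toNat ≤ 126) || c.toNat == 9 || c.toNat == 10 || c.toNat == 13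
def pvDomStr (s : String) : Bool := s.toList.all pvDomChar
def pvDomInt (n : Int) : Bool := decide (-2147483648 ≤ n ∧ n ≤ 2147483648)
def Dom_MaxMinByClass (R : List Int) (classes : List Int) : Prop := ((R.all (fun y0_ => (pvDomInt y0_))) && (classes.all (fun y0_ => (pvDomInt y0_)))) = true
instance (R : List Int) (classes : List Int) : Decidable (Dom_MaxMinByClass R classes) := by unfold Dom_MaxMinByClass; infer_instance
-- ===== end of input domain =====

-- B replaces A's fused index loop (two running state variables) by a partition of
-- zip(R, classes) into class-0 / class-nonzero values followed by built-in min/max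
-- with default=None: objective 'simpler'.


-- ===== PORT A =====
def MaxMinByClass (R : List Int) (classes : List Int) : Option Int × Option Int :=
  -- for i in range(len(R)): classes[i], R[i] are in range inside Pre_; pyGetD is exact there
  (PySem.List.pyRange 0 (PySem.List.len R) 1).foldl
    (fun acc i =>
      let r := PySem.List.pyGetD R i 0
      if PySem.List.pyGetD classes i 0 = 0 then
        match acc.1 with
        | none => (some r, acc.2)                                -- Min_K1 == None
        | some a => if a > r then (some r, acc.2) else acc       -- Min_K1 > R[i]
      else
        match acc.2 with
        | none => (acc.1, some r)                                -- Max_K2 == None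
        | some b => if b < r then (acc.1, some r) else acc)      -- Max_K2 < R[i]
    (none, none)

-- ===== PORT B =====
def MaxMinByClass_alt (R : List Int) (classes : List Int) : Option Int × Option Int :=
  let zeros := ((R.zip classes).filter (fun p => p.2 == 0)).map (fun p => p.1)
  let ones := ((R.zip classes).filter (fun p => p.2 != 0)).map (fun p => p.1)
  (PySem.List.min? zeros (fun x => x), PySem.List.max? ones (fun x => x))

-- ===== PRECONDITION & SPEC =====
-- A indexes classes[i] for every i < len(R): it raises IndexError when classes is shorter than R.
def Pre_MaxMinByClass (R : List Int) (classes : List Int) : Prop := R.length ≤ classes.length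
instance (R : List Int) (classes : List Int) : Decidable (Pre_MaxMinByClass R classes) := by unfold Pre_MaxMinByClass; infer_instance
def pvWitness_MaxMinByClass : List Int × List Int := ([3, 1, 4], [0, 1, 0])

def Spec_MaxMinByClass (R : List Int) (classes : List Int) (out : Option Int × Option Int) : Prop := out = MaxMinByClass_alt R classes
instance (R : List Int) (classes : List Int) (out : Option Int × Option Int) : Decidable (Spec_MaxMinByClass R classes out) := by unfold Spec_MaxMinByClass; infer_instance

-- ===== CLAIM (what is proved, stated in full; the proofs are below) =====
def Claim_equal_MaxMinByClass : Prop := ∀ (R : List Int) (classes : List Int), Dom_MaxMinByClass R classes → Pre_MaxMinByClass R classes → Spec_MaxMinByClass R classes (MaxMinByClass R classes)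

-- ===== LEMMAS AND PROOFS =====

-- A's loop body, rewritten over a (value, class) pair.
def pvStep (acc : Option Int × Option Int) (p : Int × Int) : Option Int × Option Int :=
  if p.2 = 0 then
    match acc.1 with
    | none => (some p.1, acc.2)
    | some a => if a > p.1 then (some p.1, acc.2) else acc
  else
    match acc.2 with
    | none => (acc.1, some p.1)
    | some b => if b < p.1 then (acc.1, some p.1) else acc

def pvMinStep (acc : Option Int) (r : Int) : Option Int :=
  match acc with
  | none => some r
  | some a => if a > r then some r else some a

def pvMaxStep (acc : Option Int) (r : Int) : Option Int :=
  match acc with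
  | none => some r
  | some b => if b < r then some r else some b

theorem pvMinStep_min (a r : Int) : pvMinStep (some a) r = some (min a r) := by
  simp only [pvMinStep]; split_ifs with h <;> simp [min_def] <;> omega

theorem pvMaxStep_max (b r : Int) : pvMaxStep (some b) r = some (max b r) := by
  simp only [pvMaxStep]; split_ifs with h <;> simp [max_def] <;> omega

theorem pvFoldMin_some (l : List Int) (a : Int) :
    l.foldl pvMinStep (some a) = some (l.foldl min a) := by
  induction l generalizing a with
  | nil => rfl
  | cons x t ih => simp [List.foldl, pvMinStep_min, ih]

theorem pvFoldMax_some (l : List Int) (b : Int) :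
    l.foldl pvMaxStep (some b) = some (l.foldl max b) := by
  induction l generalizing b with
  | nil => rfl
  | cons x t ih => simp [List.foldl, pvMaxStep_max, ih]

theorem pvMin?_eq_fold (l : List Int) :
    PySem.List.min? l (fun x => x) = l.foldl pvMinStep none := by
  cases l with
  | nil => rfl
  | cons x t => simp [PySem.List.min?_id_cons, List.foldl, pvMinStep, pvFoldMin_some]

theorem pvMax?_eq_fold (l : List Int) :
    PySem.List.max? l (fun x => x) = l.foldl pvMaxStep none := by
  cases l with
  | nil => rfl
  | cons x t => simp [PySem.List.max?_id_cons, List.foldl, pvMaxStep, pvFoldMax_some]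

-- The fused loop over pairs computes the two filtered folds componentwise.
theorem pvStep_split (L : List (Int × Int)) (m M : Option Int) :
    L.foldl pvStep (m, M) =
      (((L.filter (fun p => p.2 == 0)).map (fun p => p.1)).foldl pvMinStep m,
       ((L.filter (fun p => p.2 != 0)).map (fun p => p.1)).foldl pvMaxStep M) := by
  induction L generalizing m M with
  | nil => rfl
  | cons p t ih =>
    simp only [List.foldl]
    by_cases h : p.2 = 0
    · have hs : pvStep (m, M) p = (pvMinStep m p.1, M) := by
        cases m <;> simp [pvStep, pvMinStep, h] <;> split <;> rfl
      rw [hs, ih]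
      simp [h]
    · have hs : pvStep (m, M) p = (m, pvMaxStep M p.1) := by
        cases M <;> simp [pvStep, pvMaxStep, h] <;> split <;> rfl
      rw [hs, ih]
      simp [h]

-- A's index loop equals the fold of pvStep over the zip (inside Pre_).
theorem pvA_eq_zip_fold (R classes : List Int) (h : R.length ≤ classes.length) :
    MaxMinByClass R classes = (R.zip classes).foldl pvStep (none, none) := by
  unfold MaxMinByClass
  have hlen : (R.zip classes).length = R.length := by
    simp [List.length_zip]; omega
  have hcongr :
      (PySem.List.pyRange 0 (PySem.List.len R) 1).foldl
        (fun acc i =>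
          let r := PySem.List.pyGetD R i 0
          if PySem.List.pyGetD classes i 0 = 0 then
            match acc.1 with
            | none => (some r, acc.2)
            | some a => if a > r then (some r, acc.2) else acc
          else
            match acc.2 with
            | none => (acc.1, some r)
            | some b => if b < r then (acc.1, some r) else acc)
        ((none, none) : Option Int × Option Int)
      = (PySem.List.pyRange 0 (PySem.List.len (R.zip classes)) 1).foldl
          (fun acc i => pvStep acc (PySem.List.pyGetD (R.zip classes) i (0, 0)))
          ((none, none) : Option Int × Option Int) := by
    rw [show PySem.List.len R = PySem.List.len (R.zip classes) by
          simp [PySem.List.len, hlen]]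
    apply PySem.List.foldl_congr_mem
    intro acc i hi
    rw [PySem.List.mem_pyRange_one] at hi
    have hiR : i.toNat < R.length := by
      simp [PySem.List.len, hlen] at hi; omega
    have hiC : i.toNat < classes.length := by omega
    have hiZ : i.toNat < (R.zip classes).length := by omega
    rw [PySem.List.pyGetD_eq_getElem R (0:Int) hi.1 (by simp [PySem.List.len] at hi ⊢; omega),
        PySem.List.pyGetD_eq_getElem classes (0:Int) hi.1 (by simp [PySem.List.len, hlen] at hi ⊢; omega),
        PySem.List.pyGetD_eq_getElem (R.zip classes) ((0:Int),(0:Int)) hi.1 (by simp [PySem.List.len, hlen] at hi ⊢; omega)]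
    simp [pvStep, List.getElem_zip]
  rw [hcongr, PySem.List.foldl_pyRange_zero_pyGetD]




-- ===== VERDICT (by name: the statement is the Claim_ definition above) =====
theorem MaxMinByClass_spec : Claim_equal_MaxMinByClass := by
  intro R classes _ hpre
  unfold Spec_MaxMinByClass MaxMinByClass_alt
  rw [pvA_eq_zip_fold R classes hpre, pvStep_split]
  simp only [pvMin?_eq_fold, pvMax?_eq_fold]
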